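-- pv_equiv track=rewrite | github.com/tomfletch/AdventOfCode2015 | 01/day_01_1.py | determine_floor
-- ===== SOURCE A (Python) =====
-- CHAR_UP = '('
--
-- CHAR_DOWN = ')'
--
-- def determine_floor(instructions):
--     floor = 0
--
--     for char in instructions:
--         if char == CHAR_UP:
--             floor += 1
--         elif char == CHAR_DOWN:
--             floor -= 1
--
--     return floor
-- ===== SOURCE B (Python) =====
-- CHAR_UP = '('
--
-- CHAR_DOWN = ')'
--
-- def determine_floor(instructions):
--     def delta(char):
--         if char == CHAR_UP:
--             return 1
--         if char == CHAR_DOWN: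
--             return -1
--         return 0
--
--     def go(s):
--         if len(s) == 0:
--             return 0
--         if len(s) == 1:
--             return delta(s[0])
--         mid = len(s) // 2
--         return go(s[:mid]) + go(s[mid:])
--
--     return go(instructions)
-- ===== Notes on version B (the rewrite author's own statement) =====
-- stated objective: alternative
-- what changed: B computes the floor by divide-and-conquer recursion: it splits the string in half, recursively computes each half's net floor change and adds them, instead of A's left-to-right loop with a running accumulator.
import Mathlib
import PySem

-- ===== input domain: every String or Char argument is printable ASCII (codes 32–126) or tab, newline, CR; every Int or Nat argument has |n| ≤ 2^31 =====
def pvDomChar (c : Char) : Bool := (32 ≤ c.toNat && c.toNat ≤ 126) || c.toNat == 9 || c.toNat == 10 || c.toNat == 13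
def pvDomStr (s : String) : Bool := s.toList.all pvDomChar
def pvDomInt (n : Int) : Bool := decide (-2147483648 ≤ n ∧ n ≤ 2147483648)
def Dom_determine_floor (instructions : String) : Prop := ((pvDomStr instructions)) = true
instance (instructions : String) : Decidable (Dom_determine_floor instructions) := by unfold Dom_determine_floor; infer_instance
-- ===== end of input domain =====

-- B computes the same net floor by divide-and-conquer on halves instead of A's running-accumulator loop.
-- ===== PORT A =====
def CHAR_UP : Char := '('
def CHAR_DOWN : Char := ')'

def determine_floor (instructions : String) : Int :=
  instructions.toList.foldl (fun floor char =>
    if char == CHAR_UP then floor + 1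
    else if char == CHAR_DOWN then floor - 1
    else floor) 0

-- ===== PORT B =====
def deltaChar (char : Char) : Int :=
  if char == CHAR_UP then 1
  else if char == CHAR_DOWN then -1
  else 0

def goFloor (s : List Char) : Int :=
  if _h0 : s.length = 0 then 0
  else if _h1 : s.length = 1 then deltaChar s[0]
  else
    let mid := s.length / 2
    goFloor (s.take mid) + goFloor (s.drop mid)
termination_by s.length
decreasing_by
  · simp; omega
  · simp; omega

def determine_floor_alt (instructions : String) : Int :=
  goFloor instructions.toList

-- ===== PRECONDITION & SPEC =====
def Spec_determine_floor (instructions : String) (out : Int) : Prop := out = determine_floor_alt instructions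
instance (instructions : String) (out : Int) : Decidable (Spec_determine_floor instructions out) := by unfold Spec_determine_floor; infer_instance

-- ===== CLAIM (what is proved, stated in full; the proofs are below) =====
def Claim_equal_determine_floor : Prop := ∀ (instructions : String), Dom_determine_floor instructions → Spec_determine_floor instructions (determine_floor instructions)

-- ===== LEMMAS AND PROOFS =====

-- ===== VERDICT (by name: the statement is the Claim_ definition above) =====
lemma goFloor_eq_sum (s : List Char) : goFloor s = (s.map deltaChar).sum := by
  induction s using goFloor.induct with
  | case1 s h0 => unfold goFloor; simp_all [List.length_eq_zero_iff.mp h0]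
  | case2 s h0 h1 =>
    unfold goFloor
    obtain ⟨c, rfl⟩ := List.length_eq_one_iff.mp h1
    simp
  | case3 s h0 h1 mid ih1 ih2 =>
    unfold goFloor
    simp only [h0, h1, dite_false]
    rw [ih1, ih2, ← List.sum_append, ← List.map_append, List.take_append_drop]

lemma foldl_eq_sum (s : List Char) (acc : Int) :
    s.foldl (fun floor char =>
      if char == CHAR_UP then floor + 1
      else if char == CHAR_DOWN then floor - 1
      else floor) acc = acc + (s.map deltaChar).sum := by
  induction s generalizing acc with
  | nil => simp
  | cons c cs ih =>
    simp only [List.foldl_cons, ih, List.map_cons, List.sum_cons, deltaChar]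
    split_ifs <;> ring

theorem determine_floor_spec : Claim_equal_determine_floor := by
  intro s _
  show determine_floor s = determine_floor_alt s
  unfold determine_floor determine_floor_alt
  rw [foldl_eq_sum, goFloor_eq_sum]
  ring
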